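-- pv_equiv track=rewrite | github.com/SachithraPinnaduwa/FYP | benchmark2/subjects/dataset/subject_64.py | determine_game_outcome
-- ===== SOURCE A (Python) =====
-- def determine_game_outcome(n, m, graph, start):
--     mk = {}
--     queue = [(start, 0, -1, 1)]
--     cycle = False
--
--     while len(queue) > 0:
--         (v, player, prev, color) = queue.pop()
--         if color == 2:
--             mk[v, player] = (prev, 2)
--             continue
--         if mk.get((v, player), None):
--             if mk[v, player][1] == 1:
--                 cycle = True
--             continue
--         mk[v, player] = (prev, 1)
--         queue.append((v, player, prev, 2))
--         for w in graph.get(v, []):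
--             queue.append((w, 1 - player, v, 1))
--
--     sol = None
--     for v in range(1, n + 1):
--         if len(graph.get(v, [])) == 0 and mk.get((v, 1), None):
--             sol = v
--             break
--
--     if sol:
--         path = [sol]
--         cur = (sol, 1)
--         while cur != (start, 0):
--             cur = (mk.get(cur)[0], 1 - cur[1])
--             path.append(cur[0])
--         return ("Win", path[::-1])
--     elif cycle:
--         return ("Draw", None)
--     else:
--         return ("Lose", None)
-- ===== SOURCE B (Python) =====
-- def determine_game_outcome(n, m, graph, start):
--     # Different stack discipline than the original: one frame per discovered
--     # (vertex, player) pair carrying its remaining children (in the original's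
--     # exploration order), marking on discovery and testing visitedness at edge
--     # time -- instead of one colour-tagged frame per edge with deferred tests.
--     mk = {(start, 0): (-1, 1)}
--     cycle = False
--     stack = [(start, 0, graph.get(start, [])[::-1])]
--     while stack:
--         v, player, rest = stack.pop()
--         if rest:
--             w, rest = rest[0], rest[1:]
--             stack.append((v, player, rest))
--             got = mk.get((w, 1 - player))
--             if got is None:
--                 mk[(w, 1 - player)] = (v, 1)
--                 stack.append((w, 1 - player, graph.get(w, [])[::-1]))
--             elif got[1] == 1:
--                 cycle = True
--         else:
--             mk[(v, player)] = (mk[(v, player)][0], 2)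
--
--     sol = None
--     for v in range(1, n + 1):
--         if len(graph.get(v, [])) == 0 and mk.get((v, 1), None):
--             sol = v
--             break
--
--     if sol:
--         path = [sol]
--         cur = (sol, 1)
--         while cur != (start, 0):
--             cur = (mk.get(cur)[0], 1 - cur[1])
--             path.append(cur[0])
--         return ("Win", path[::-1])
--     elif cycle:
--         return ("Draw", None)
--     else:
--         return ("Lose", None)
-- ===== Notes on version B (the rewrite author's own statement) =====
-- stated objective: alternative
-- what changed: A's DFS pushes one colour-tagged frame per edge (plus a re-pushed colour-2 frame per node) and defers the visited test to pop time, so duplicate frames sit on the stack; B keeps exactly one frame per discovered (vertex,player) pair carrying its remaining children, marks on discovery and tests visitedness at edge time, reading the recorded parent from the dict when blackening.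
import Mathlib
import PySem

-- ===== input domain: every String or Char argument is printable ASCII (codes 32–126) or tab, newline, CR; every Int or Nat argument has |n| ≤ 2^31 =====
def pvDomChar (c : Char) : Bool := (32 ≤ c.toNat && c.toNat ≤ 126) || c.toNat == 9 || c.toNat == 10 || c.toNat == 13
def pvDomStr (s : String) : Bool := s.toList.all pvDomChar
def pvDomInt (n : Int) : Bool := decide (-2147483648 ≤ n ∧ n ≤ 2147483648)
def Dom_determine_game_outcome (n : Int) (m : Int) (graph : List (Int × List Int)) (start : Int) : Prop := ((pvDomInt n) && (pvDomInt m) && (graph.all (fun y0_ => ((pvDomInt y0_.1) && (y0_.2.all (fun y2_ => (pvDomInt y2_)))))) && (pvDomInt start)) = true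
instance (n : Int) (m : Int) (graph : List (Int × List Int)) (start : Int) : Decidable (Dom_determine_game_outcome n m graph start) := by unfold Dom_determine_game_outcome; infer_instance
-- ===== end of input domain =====

-- B replaces A's one-colour-tagged-frame-per-edge DFS stack (with deferred visited
-- tests and duplicate frames) by one frame per discovered (vertex, player) pair that
-- carries its remaining children, marking on discovery; objective: alternative.

-- ===== PORT A =====
-- Fuel for the while loops: an input-computed upper bound on the number of Python
-- loop iterations (pure totality plumbing; both ports use the same bound).
def pvFuel (graph : List (Int × List Int)) : Nat :=
  let T := graph.foldl (fun a p => a + 1 + p.2.length) 1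
  2 * (T + 1) * (T + 1)

-- A's while loop over the queue of (v, player, prev, color) frames; the head of the
-- Lean list is the top of the Python stack (so Python's appends arrive reversed).
def pvLoopA (graph : List (Int × List Int)) :
    Nat → List (Int × Int × Int × Int) → PySem.Dict (Int × Int) (Int × Int) → Bool →
    PySem.Dict (Int × Int) (Int × Int) × Bool
  | 0, _, mk, cy => (mk, cy)                       -- out of fuel (never reached: pvFuel bounds the pops)
  | _ + 1, [], mk, cy => (mk, cy)
  | f + 1, (v, p, pr, c) :: stk, mk, cy =>
    if c == 2 then pvLoopA graph f stk (mk.insert (v, p) (pr, 2)) cy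
    else
      match mk.get? (v, p) with
      -- mk values are pairs, always truthy in Python, so `if mk.get(..., None):` is isSome
      | some got => pvLoopA graph f stk mk (cy || (got.2 == 1))
      | none =>
          pvLoopA graph f
            ((((PySem.Dict.mk graph).getD v []).map (fun w => (w, 1 - p, v, (1 : Int)))).reverse
              ++ (v, p, pr, 2) :: stk)
            (mk.insert (v, p) (pr, 1)) cy

-- The terminal-vertex scan and the path reconstruction are VERBATIM identical in the
-- two Python sources, so both ports share these helpers.
-- `for v in range(1, n+1): ... sol = v; break`
def pvFindSol (graph : List (Int × List Int)) (mk : PySem.Dict (Int × Int) (Int × Int)) :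
    List Int → Option Int
  | [] => none
  | v :: vs =>
    -- mk.get((v,1), None) is a pair when present, hence truthy iff present
    if (((PySem.Dict.mk graph).getD v []).length == 0) && (mk.get? (v, 1)).isSome then some v
    else pvFindSol graph mk vs

-- `while cur != (start, 0): cur = (mk.get(cur)[0], 1 - cur[1]); path.append(cur[0])`
-- fuel mk.size + 1 suffices: the chain strictly descends mk's insertion order
def pvPath (mk : PySem.Dict (Int × Int) (Int × Int)) (start : Int) :
    Nat → (Int × Int) → List Int → List Int
  | 0, _, path => path
  | f + 1, cur, path =>
    if cur == (start, 0) then path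
    else
      match mk.get? cur with
      | none => path                               -- Python would raise here; unreachable once sol was found
      | some pv => pvPath mk start f (pv.1, 1 - cur.2) (path ++ [pv.1])

def pvAssemble (n : Int) (graph : List (Int × List Int)) (start : Int)
    (mk : PySem.Dict (Int × Int) (Int × Int)) (cy : Bool) : String × Option (List Int) :=
  match pvFindSol graph mk (PySem.List.pyRange 1 (n + 1) 1) with
  | some sol =>
      -- sol ≥ 1, so Python's `if sol:` is the isSome test; path[::-1] is reverse
      ("Win", some ((pvPath mk start (mk.size + 1) (sol, 1) [sol]).reverse))
  | none => if cy then ("Draw", none) else ("Lose", none)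

def determine_game_outcome (n : Int) (m : Int) (graph : List (Int × List Int)) (start : Int) : String × Option (List Int) :=
  -- A performs exactly one loop iteration more than B (the initial discovery pop)
  let r := pvLoopA graph (pvFuel graph + 1) [(start, 0, -1, 1)] PySem.Dict.empty false
  pvAssemble n graph start r.1 r.2

-- ===== PORT B =====
-- B's while loop: frames (v, player, rest) with rest = remaining children in
-- exploration order (graph.get(v, [])[::-1] is the list reversed).
def pvLoopB (graph : List (Int × List Int)) :
    Nat → List (Int × Int × List Int) → PySem.Dict (Int × Int) (Int × Int) → Bool →
    PySem.Dict (Int × Int) (Int × Int) × Bool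
  | 0, _, mk, cy => (mk, cy)                       -- out of fuel (never reached)
  | _ + 1, [], mk, cy => (mk, cy)
  | f + 1, (v, p, rest) :: stk, mk, cy =>
    match rest with
    | w :: rest' =>                                -- `if rest: w, rest = rest[0], rest[1:]`
      match mk.get? (w, 1 - p) with
      | none =>
          pvLoopB graph f
            ((w, 1 - p, ((PySem.Dict.mk graph).getD w []).reverse) :: (v, p, rest') :: stk)
            (mk.insert (w, 1 - p) (v, 1)) cy
      | some got => pvLoopB graph f ((v, p, rest') :: stk) mk (cy || (got.2 == 1))
    | [] =>
      match mk.get? (v, p) with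
      | some pv => pvLoopB graph f stk (mk.insert (v, p) (pv.1, 2)) cy
      | none => pvLoopB graph f stk mk cy          -- Python would raise KeyError; unreachable (frame keys are marked)

def determine_game_outcome_alt (n : Int) (m : Int) (graph : List (Int × List Int)) (start : Int) : String × Option (List Int) :=
  let mk0 := (PySem.Dict.empty).insert ((start, 0) : Int × Int) ((-1, 1) : Int × Int)
  let r := pvLoopB graph (pvFuel graph)
    [(start, 0, ((PySem.Dict.mk graph).getD start []).reverse)] mk0 false
  pvAssemble n graph start r.1 r.2

-- ===== PRECONDITION & SPEC =====
def Spec_determine_game_outcome (n : Int) (m : Int) (graph : List (Int × List Int)) (start : Int) (out : String × Option (List Int)) : Prop := out = determine_game_outcome_alt n m graph start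
instance (n : Int) (m : Int) (graph : List (Int × List Int)) (start : Int) (out : String × Option (List Int)) : Decidable (Spec_determine_game_outcome n m graph start out) := by unfold Spec_determine_game_outcome; infer_instance

-- ===== CLAIM (what is proved, stated in full; the proofs are below) =====
def Claim_equal_determine_game_outcome : Prop := ∀ (n : Int) (m : Int) (graph : List (Int × List Int)) (start : Int), Dom_determine_game_outcome n m graph start → Spec_determine_game_outcome n m graph start (determine_game_outcome n m graph start)

-- ===== LEMMAS AND PROOFS =====

-- the (v, player) keys of B's stack frames
def pvKeysB (sB : List (Int × Int × List Int)) : List (Int × Int) :=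
  sB.map (fun fr => (fr.1, fr.2.1))

-- Simulation invariant: A's stack is the frame-wise expansion of B's stack (each
-- B frame (v,p,rest) expands to rest's pending edge frames followed by the colour-2
-- frame carrying the prev recorded in mk), B's frame keys are gray and distinct.
def pvRel (mk : PySem.Dict (Int × Int) (Int × Int)) :
    List (Int × Int × List Int) → List (Int × Int × Int × Int) → Prop
  | [], sA => sA = []
  | (v, p, rest) :: t, sA => ∃ pr sA',
      mk.get? (v, p) = some (pr, 1) ∧
      sA = rest.map (fun w => (w, 1 - p, v, (1 : Int))) ++ (v, p, pr, 2) :: sA' ∧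
      (v, p) ∉ pvKeysB t ∧ pvRel mk t sA'

lemma pvRel_keys {mk : PySem.Dict (Int × Int) (Int × Int)}
    {sB : List (Int × Int × List Int)} {sA : List (Int × Int × Int × Int)}
    (h : pvRel mk sB sA) {k : Int × Int} (hk : k ∈ pvKeysB sB) :
    ∃ pr, mk.get? k = some (pr, 1) := by
  induction sB generalizing sA with
  | nil => simp [pvKeysB] at hk
  | cons fr t ih =>
    obtain ⟨v, p, rest⟩ := fr
    obtain ⟨pr, sA', hget, _, _, hrel⟩ := h
    rcases List.mem_cons.mp hk with h1 | h2
    · exact ⟨pr, h1 ▸ hget⟩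
    · exact ih hrel h2

lemma pvRel_insert {mk : PySem.Dict (Int × Int) (Int × Int)}
    {sB : List (Int × Int × List Int)} {sA : List (Int × Int × Int × Int)}
    (key : Int × Int) (x : Int × Int)
    (h : pvRel mk sB sA) (hk : key ∉ pvKeysB sB) : pvRel (mk.insert key x) sB sA := by
  induction sB generalizing sA with
  | nil => exact h
  | cons fr t ih =>
    obtain ⟨v, p, rest⟩ := fr
    obtain ⟨pr, sA', hget, hsa, hnin, hrel⟩ := h
    have hne : (v, p) ≠ key := by
      intro hcon; exact hk (by simp [pvKeysB, ← hcon])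
    refine ⟨pr, sA', ?_, hsa, hnin, ih hrel (fun hm => hk (by simp [pvKeysB] at hm ⊢; right; exact hm))⟩
    rw [PySem.Dict.get?_insert_of_ne _ _ hne]
    exact hget

lemma pvSim (graph : List (Int × List Int)) :
    ∀ (f : Nat) (sB : List (Int × Int × List Int)) (sA : List (Int × Int × Int × Int))
      (mk : PySem.Dict (Int × Int) (Int × Int)) (cy : Bool),
      pvRel mk sB sA → pvLoopA graph f sA mk cy = pvLoopB graph f sB mk cy := by
  intro f
  induction f with
  | zero => intro sB sA mk cy _; rfl
  | succ f ih =>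
    intro sB sA mk cy h
    match sB with
    | [] => rw [h]; rfl
    | (v, p, rest) :: t =>
      obtain ⟨pr, sA', hget, hsa, hnin, hrel⟩ := h
      match rest with
      | [] =>
        subst hsa
        simp only [List.map_nil, List.nil_append, pvLoopA, pvLoopB, hget]
        exact ih t sA' _ cy (pvRel_insert _ _ hrel hnin)
      | w :: rest' =>
        subst hsa
        have hp : (1 : Int) - p ≠ p := by omega
        simp only [List.map_cons, List.cons_append, pvLoopA, pvLoopB]
        cases hw : mk.get? (w, 1 - p) with
        | some got =>
          exact ih ((v, p, rest') :: t) _ mk _ ⟨pr, sA', hget, rfl, hnin, hrel⟩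
        | none =>
          have hwt : (w, 1 - p) ∉ pvKeysB t := by
            intro hm
            obtain ⟨pr', hpr'⟩ := pvRel_keys hrel hm
            rw [hw] at hpr'; cases hpr'
          have hwv : ((w, 1 - p) : Int × Int) ≠ (v, p) := by
            intro hc; exact hp (congrArg Prod.snd hc)
          refine ih _ _ _ cy ?_
          refine ⟨v, rest'.map (fun u => (u, 1 - p, v, (1 : Int))) ++ (v, p, pr, 2) :: sA',
            PySem.Dict.get?_insert_self _ _ _, by rw [List.map_reverse], ?_, ?_⟩
          · intro hm
            simp only [pvKeysB, List.map_cons, List.mem_cons] at hm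
            rcases hm with hm | hm
            · exact hwv hm
            · exact hwt hm
          · refine ⟨pr, sA', ?_, rfl, hnin, pvRel_insert _ _ hrel hwt⟩
            rw [PySem.Dict.get?_insert_of_ne _ _ (Ne.symm hwv)]
            exact hget

-- ===== VERDICT (by name: the statement is the Claim_ definition above) =====
theorem determine_game_outcome_spec : Claim_equal_determine_game_outcome := by
  intro n m graph start _
  unfold Spec_determine_game_outcome determine_game_outcome determine_game_outcome_alt
  have h1 : pvLoopA graph (pvFuel graph + 1) [(start, 0, -1, 1)] PySem.Dict.empty false
      = pvLoopB graph (pvFuel graph)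
          [(start, 0, ((PySem.Dict.mk graph).getD start []).reverse)]
          ((PySem.Dict.empty).insert ((start, 0) : Int × Int) ((-1, 1) : Int × Int)) false := by
    simp only [pvLoopA, PySem.Dict.get?_empty]
    refine pvSim graph _ _ _ _ _ ?_
    exact ⟨-1, [], PySem.Dict.get?_insert_self _ _ _, by rw [List.map_reverse], by simp [pvKeysB], rfl⟩
  simp only [h1]
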